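-- pv_equiv track=rewrite | github.com/shinkeonkim/boj-solution-archiving-site | data/source/3232_75061194.py | f
-- ===== SOURCE A (Python) =====
-- def f(a, base):
-- 	ret = 0
--
-- 	z = 1
-- 	while a > 0:
-- 		ret += (a % 10) * z
-- 		z *= base
-- 		a //= 10
--
-- 	return ret
-- ===== SOURCE B (Python) =====
-- def f(a, base):
--     ret = 0
--     for c in str(a):
--         ret = ret * base + int(c)
--     return ret
-- ===== Notes on version B (the rewrite author's own statement) =====
-- stated objective: idiomatic
-- what changed: Replaces the least-significant-first while loop (divmod by 10, accumulating powers of the base) with a single Horner pass over str(a), most-significant digit first; Pre_ excludes negative a, where B's string parse hits the '-' sign and raises while A's loop body never runs and it returns 0.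
-- outside the precondition, e.g. on f(-5, 10): A returns 0, B raises ValueError
import Mathlib
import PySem

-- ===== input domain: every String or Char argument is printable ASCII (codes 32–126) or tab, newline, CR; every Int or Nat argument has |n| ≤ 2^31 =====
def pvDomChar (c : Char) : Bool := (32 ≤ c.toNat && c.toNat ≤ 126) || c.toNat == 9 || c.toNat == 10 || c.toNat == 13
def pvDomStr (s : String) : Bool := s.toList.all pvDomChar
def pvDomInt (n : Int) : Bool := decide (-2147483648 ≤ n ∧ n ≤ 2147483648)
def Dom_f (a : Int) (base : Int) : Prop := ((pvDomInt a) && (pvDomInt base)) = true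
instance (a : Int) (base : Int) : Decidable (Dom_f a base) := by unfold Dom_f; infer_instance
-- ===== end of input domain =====

-- B replaces A's least-significant-first divmod loop by a Horner pass over str(a) (idiomatic, same cost).

-- ===== PORT A =====
-- while a > 0: ret += (a % 10) * z; z *= base; a //= 10
def fLoop (base : Int) (a : Int) (ret : Int) (z : Int) : Int :=
  if h : a > 0 then
    fLoop base (PySem.Int.floordiv a 10) (ret + (PySem.Int.mod a 10) * z) (z * base)
  else ret
termination_by a.toNat
decreasing_by
  simp only [PySem.Int.floordiv, Int.fdiv_eq_ediv]
  omega

def f (a : Int) (base : Int) : Int := fLoop base a 0 1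

-- ===== PORT B =====
-- for c in str(a): ret = ret * base + int(c)
-- int(c) is ported as c.toNat - 48, exact for the digit characters str(a) yields when a ≥ 0 (Pre_f).
def f_alt (a : Int) (base : Int) : Int :=
  (PySem.Int.toStr a).toList.foldl (fun ret c => ret * base + ((c.toNat : Int) - 48)) 0

-- ===== PRECONDITION & SPEC =====
-- Pre_ excludes a < 0: there B's Horner pass over str(a) meets the '-' sign and int('-') raises
-- ValueError, while A's while-loop never runs and returns 0.
def Pre_f (a : Int) (base : Int) : Prop := 0 ≤ a
instance (a : Int) (base : Int) : Decidable (Pre_f a base) := by unfold Pre_f; infer_instance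
def pvWitness_f : Int × Int := (305, 7)

def Spec_f (a : Int) (base : Int) (out : Int) : Prop := out = f_alt a base
instance (a : Int) (base : Int) (out : Int) : Decidable (Spec_f a base out) := by unfold Spec_f; infer_instance

-- ===== CLAIM (what is proved, stated in full; the proofs are below) =====
def Claim_equal_f : Prop := ∀ (a : Int) (base : Int), Dom_f a base → Pre_f a base → Spec_f a base (f a base)

-- ===== LEMMAS AND PROOFS =====

-- value of a little-endian digit list in the given base
def digitsVal (base : Int) (ds : List Nat) : Int :=
  ds.foldr (fun d r => r * base + (d : Int)) 0

theorem digitsVal_cons (base : Int) (d : Nat) (t : List Nat) :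
    digitsVal base (d :: t) = digitsVal base t * base + (d : Int) := rfl

theorem fLoop_eq (base : Int) : ∀ (n : Nat) (ret z : Int),
    fLoop base (n : Int) ret z = ret + z * digitsVal base (Nat.digits 10 n) := by
  intro n
  induction n using Nat.strong_induction_on with
  | _ n ih =>
    intro ret z
    rw [fLoop]
    by_cases hn : n = 0
    · subst hn; simp [digitsVal]
    · have hpos : ((n : Int) > 0) := by omega
      have hd : PySem.Int.floordiv (n : Int) 10 = ((n / 10 : Nat) : Int) := by
        simp only [PySem.Int.floordiv, Int.fdiv_eq_ediv]; omega
      have hm : PySem.Int.mod (n : Int) 10 = ((n % 10 : Nat) : Int) := by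
        simp only [PySem.Int.mod, Int.fmod_eq_emod]; omega
      rw [dif_pos hpos, hd, hm,
        Nat.digits_def' (by norm_num : 1 < 10) (Nat.pos_of_ne_zero hn),
        ih (n / 10) (Nat.div_lt_self (Nat.pos_of_ne_zero hn) (by norm_num)),
        digitsVal_cons]
      ring

theorem digitChar_toNat (d : Nat) (h : d < 10) :
    ((Nat.digitChar d).toNat : Int) = 48 + d := by
  interval_cases d <;> decide

theorem toDigitsCore_eq : ∀ (n : Nat), 0 < n → ∀ (fuel : Nat), n < fuel → ∀ (acc : List Char),
    Nat.toDigitsCore 10 fuel n acc = ((Nat.digits 10 n).map Nat.digitChar).reverse ++ acc := by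
  intro n
  induction n using Nat.strong_induction_on with
  | _ n ih =>
    intro hn fuel hfuel acc
    match fuel, hfuel with
    | fuel + 1, hfuel =>
      rw [Nat.toDigitsCore]
      by_cases h10 : n / 10 = 0
      · rw [if_pos h10, Nat.digits_def' (by norm_num : 1 < 10) hn, h10]
        simp
      · rw [if_neg h10,
          ih (n / 10) (Nat.div_lt_self hn (by norm_num)) (by omega) fuel (by omega),
          Nat.digits_def' (by norm_num : 1 < 10) hn]
        simp

theorem horner_rev (base : Int) : ∀ (ds : List Nat), (∀ d ∈ ds, d < 10) → ∀ (r : Int),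
    ((ds.map Nat.digitChar).reverse).foldl
        (fun ret c => ret * base + ((c.toNat : Int) - 48)) r
      = r * base ^ ds.length + digitsVal base ds := by
  intro ds
  induction ds with
  | nil => intro _ r; simp [digitsVal]
  | cons d t iht =>
    intro h r
    simp only [List.map_cons, List.reverse_cons, List.foldl_append, List.foldl_cons,
      List.foldl_nil]
    rw [iht (fun x hx => h x (List.mem_cons_of_mem _ hx)) r,
      digitChar_toNat d (h d (List.mem_cons_self ..)),
      digitsVal_cons, List.length_cons]
    ring

-- ===== VERDICT (by name: the statement is the Claim_ definition above) =====
theorem f_spec : Claim_equal_f := by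
  intro a base _ hpre
  unfold Pre_f at hpre
  unfold Spec_f f f_alt
  obtain ⟨n, rfl⟩ : ∃ n : Nat, a = (n : Int) := ⟨a.toNat, by omega⟩
  rw [fLoop_eq, PySem.Int.toList_toStr]
  simp only [PySem.Int.toChars, if_neg (Int.not_lt.mpr (Int.natCast_nonneg n)), Int.toNat_natCast]
  by_cases hn : n = 0
  · subst hn
    show (0 : Int) + 1 * digitsVal base (Nat.digits 10 0)
        = List.foldl _ 0 (Nat.toDigits 10 0)
    norm_num [digitsVal, Nat.toDigits, Nat.toDigitsCore]
    decide
  · rw [Nat.toDigits, toDigitsCore_eq n (by omega) (n + 1) (by omega) [],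
      List.append_nil,
      horner_rev base _ (fun d hd => Nat.digits_lt_base (by norm_num) hd) 0]
    ring
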